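-- pv_equiv track=rewrite | github.com/etchelepi/x3i_extract | x3i_extract.py | index_str_list
-- ===== SOURCE A (Python) =====
-- def signed_to_str(signed_num):
--     if(signed_num < 0):
--         rtn_str = str(signed_num)
--     elif(signed_num > 0):
--         rtn_str = "+" + str(signed_num)
--     else:
--         rtn_str = "_0"
--
--     return rtn_str
--
-- def index_str_list(num_enteries):
--     index_list = []
--
--     index_list.append(signed_to_str(0))
--
--     index_end   = int((num_enteries + num_enteries%2) /2)
--     index_start = int(num_enteries/2) - (num_enteries - num_enteries%2)
--
--     for x in range (index_start,index_end):
--         if(x != 0):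
--             index_list.append(signed_to_str(x))
--
--     return index_list
-- ===== SOURCE B (Python) =====
-- def index_str_list(num_enteries):
--     head = ["_0"]
--     tail = []
--     n = num_enteries
--     while n >= 2:
--         if n % 2 == 0:
--             head.append(str(-(n // 2)))
--         else:
--             tail.append("+" + str(n // 2))
--         n -= 1
--     tail.reverse()
--     return head + tail
-- ===== Notes on version B (the rewrite author's own statement) =====
-- stated objective: alternative
-- what changed: Instead of computing the index bounds and looping over range(start,end) with a skip-zero guard through signed_to_str, B peels the entry count down one at a time: while at least two entries remain it emits the single label that distinguishes that count from one fewer (an even count appends a new most-negative index to the head, an odd count a new largest positive to a tail that is reversed once at the end), so neither the range bounds, the range loop nor the zero test exist.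
import Mathlib
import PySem

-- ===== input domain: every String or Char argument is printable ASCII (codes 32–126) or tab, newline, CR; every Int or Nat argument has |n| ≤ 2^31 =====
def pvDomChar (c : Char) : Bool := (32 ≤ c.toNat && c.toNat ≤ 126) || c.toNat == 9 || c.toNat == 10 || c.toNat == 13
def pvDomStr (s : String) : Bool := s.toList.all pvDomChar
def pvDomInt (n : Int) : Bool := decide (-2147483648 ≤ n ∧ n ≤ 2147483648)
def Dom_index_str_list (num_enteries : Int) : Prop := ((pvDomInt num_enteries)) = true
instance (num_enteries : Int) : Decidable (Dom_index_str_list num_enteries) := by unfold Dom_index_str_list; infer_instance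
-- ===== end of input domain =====

-- B replaces the bounds-plus-range loop with a countdown peel: each step with two or more entries left emits the one
-- label distinguishing n entries from n-1 (even n a new most-negative, odd n a new largest
-- positive), with two accumulators and one final reverse (objective: alternative).

-- ===== PORT A =====
def signed_to_str (signed_num : Int) : String :=
  if signed_num < 0 then PySem.Int.toStr signed_num
  else if signed_num > 0 then "+" ++ PySem.Int.toStr signed_num
  else "_0"

def index_str_list (num_enteries : Int) : List String :=
  let index_list : List String := []
  let index_list := index_list ++ [signed_to_str 0]
  -- int(x/2) on exact-in-float ints is truncation toward zero: PySem.Int.truncdiv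
  let index_end := PySem.Int.truncdiv (num_enteries + PySem.Int.mod num_enteries 2) 2
  let index_start := PySem.Int.truncdiv num_enteries 2 - (num_enteries - PySem.Int.mod num_enteries 2)
  (PySem.List.pyRange index_start index_end 1).foldl
    (fun acc x => if x != 0 then acc ++ [signed_to_str x] else acc) index_list

-- ===== PORT B =====
-- the while loop of Source B: n counts down; head collects negatives, tail the positives (reversed)
def idxLoop (n : Int) (head tail : List String) : List String × List String :=
  if 2 ≤ n then
    if PySem.Int.mod n 2 == 0 then
      idxLoop (n - 1) (head ++ [PySem.Int.toStr (-(PySem.Int.floordiv n 2))]) tail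
    else
      idxLoop (n - 1) head (tail ++ ["+" ++ PySem.Int.toStr (PySem.Int.floordiv n 2)])
  else (head, tail)
termination_by n.toNat
decreasing_by all_goals omega

def index_str_list_alt (num_enteries : Int) : List String :=
  let p := idxLoop num_enteries ["_0"] []
  p.1 ++ p.2.reverse

-- ===== PRECONDITION & SPEC =====
def Spec_index_str_list (num_enteries : Int) (out : List String) : Prop := out = index_str_list_alt num_enteries
instance (num_enteries : Int) (out : List String) : Decidable (Spec_index_str_list num_enteries out) := by unfold Spec_index_str_list; infer_instance

-- ===== CLAIM =====
def Claim_equal_index_str_list : Prop := ∀ (num_enteries : Int), Dom_index_str_list num_enteries → Spec_index_str_list num_enteries (index_str_list num_enteries)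

-- ===== LEMMAS AND PROOFS =====

-- A's start bound equals -(n//2) once n ≥ 2
theorem a_start_eq (n : Int) (h : 2 ≤ n) :
    Int.tdiv n 2 - (n - Int.fmod n 2) = -(Int.fdiv n 2) := by
  rw [Int.tdiv_eq_ediv, Int.fmod_eq_emod, Int.fdiv_eq_ediv]
  split_ifs <;> omega

-- A's end bound equals the floor form for every n
theorem a_end_eq (n : Int) :
    Int.tdiv (n + Int.fmod n 2) 2 = Int.fdiv (n + Int.fmod n 2) 2 := by
  rw [Int.fmod_eq_emod, Int.tdiv_eq_ediv, Int.fdiv_eq_ediv]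
  split_ifs <;> omega

-- the canonical value both sides are reduced to
def canonical (n : Int) : List String :=
  ["_0"] ++ (PySem.List.pyRange (-(n / 2)) 0 1).map (fun x => PySem.Int.toStr x)
         ++ (PySem.List.pyRange 1 ((n + n % 2) / 2) 1).map (fun x => "+" ++ PySem.Int.toStr x)

theorem a_canon (n : Int) : index_str_list n = canonical n := by
  unfold index_str_list canonical
  simp only [PySem.Int.truncdiv, PySem.Int.mod, List.nil_append]
  rw [PySem.List.foldl_append_if (fun x => x != 0) signed_to_str]
  by_cases h : 2 ≤ n
  · rw [a_end_eq n, a_start_eq n h]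
    have hfd : Int.fdiv n 2 = n / 2 := by
      rw [Int.fdiv_eq_ediv]; split_ifs <;> omega
    have hfm : Int.fmod n 2 = n % 2 := by
      rw [Int.fmod_eq_emod]; split_ifs <;> omega
    have hfe : Int.fdiv (n + Int.fmod n 2) 2 = (n + n % 2) / 2 := by
      rw [Int.fdiv_eq_ediv, hfm]; split_ifs <;> omega
    rw [hfd, hfe]
    have hs : -(n / 2) ≤ 0 := by omega
    have he : 0 < (n + n % 2) / 2 := by omega
    rw [PySem.List.pyRange_one_append (-(n / 2)) 0 ((n + n % 2) / 2) hs (le_of_lt he),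
        PySem.List.pyRange_one_cons he]
    simp only [List.filter_append, List.filter_cons, List.map_append, zero_add]
    norm_num
    have hneg : (PySem.List.pyRange (-(n / 2)) 0 1).filter (fun x => x != 0)
        = PySem.List.pyRange (-(n / 2)) 0 1 := by
      apply List.filter_eq_self.mpr
      intro x hx
      have := PySem.List.mem_pyRange_one.mp hx
      simp only [bne_iff_ne, ne_eq]
      omega
    have hpos : (PySem.List.pyRange 1 ((n + n % 2) / 2) 1).filter (fun x => x != 0)
        = PySem.List.pyRange 1 ((n + n % 2) / 2) 1 := by
      apply List.filter_eq_self.mpr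
      intro x hx
      have := PySem.List.mem_pyRange_one.mp hx
      simp only [bne_iff_ne, ne_eq]
      omega
    rw [hneg, hpos]
    have mneg : (PySem.List.pyRange (-(n / 2)) 0 1).map signed_to_str
        = (PySem.List.pyRange (-(n / 2)) 0 1).map (fun x => PySem.Int.toStr x) := by
      apply List.map_congr_left
      intro x hx
      have := PySem.List.mem_pyRange_one.mp hx
      unfold signed_to_str
      rw [if_pos (by omega)]
    have mpos : (PySem.List.pyRange 1 ((n + n % 2) / 2) 1).map signed_to_str
        = (PySem.List.pyRange 1 ((n + n % 2) / 2) 1).map (fun x => "+" ++ PySem.Int.toStr x) := by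
      apply List.map_congr_left
      intro x hx
      have := PySem.List.mem_pyRange_one.mp hx
      unfold signed_to_str
      rw [if_neg (by omega), if_pos (by omega)]
    rw [mneg, mpos]
    exact ⟨rfl, rfl⟩
  · have hA : ((PySem.List.pyRange
        (Int.tdiv n 2 - (n - Int.fmod n 2)) (Int.tdiv (n + Int.fmod n 2) 2) 1).filter
          (fun x => x != 0)) = [] := by
      apply List.filter_eq_nil_iff.mpr
      intro x hx
      have hm := PySem.List.mem_pyRange_one.mp hx
      have h1 : 0 ≤ Int.tdiv n 2 - (n - Int.fmod n 2) := by
        rw [Int.tdiv_eq_ediv, Int.fmod_eq_emod, (show Int.sign 2 = 1 by decide)]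
        split_ifs <;> omega
      have h2 : Int.tdiv (n + Int.fmod n 2) 2 ≤ 1 := by
        rw [Int.tdiv_eq_ediv, Int.fmod_eq_emod, (show Int.sign 2 = 1 by decide)]
        split_ifs <;> omega
      simp only [bne_iff_ne, ne_eq, not_not]
      omega
    have hB1 : PySem.List.pyRange (-(n / 2)) 0 1 = [] := by
      apply PySem.List.pyRange_one_eq_nil; omega
    have hB2 : PySem.List.pyRange 1 ((n + n % 2) / 2) 1 = [] := by
      apply PySem.List.pyRange_one_eq_nil; omega
    rw [hA, hB1, hB2]
    simp
    rfl

-- the loop invariant of B: idxLoop accumulates exactly the two halves of the canonical list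
theorem idxLoop_eq (n : Int) (head tail : List String) :
    idxLoop n head tail =
      (head ++ (PySem.List.pyRange (-(n / 2)) 0 1).map (fun x => PySem.Int.toStr x),
       tail ++ ((PySem.List.pyRange 1 ((n + n % 2) / 2) 1).map
         (fun x => "+" ++ PySem.Int.toStr x)).reverse) := by
  induction n, head, tail using idxLoop.induct with
  | case1 n head tail h hmod ih =>
    rw [idxLoop, if_pos h, if_pos hmod, ih]
    have hm : n % 2 = 0 := by
      have := (beq_iff_eq).mp hmod
      rwa [PySem.Int.mod_eq_emod_of_pos (by omega : (0:Int) < 2)] at this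
    have hfd : PySem.Int.floordiv n 2 = n / 2 :=
      PySem.Int.floordiv_eq_ediv_of_pos (by omega : (0:Int) < 2)
    have h1 : -((n - 1) / 2) = -(n / 2) + 1 := by omega
    have h2 : (n - 1 + (n - 1) % 2) / 2 = (n + n % 2) / 2 := by omega
    have hcons : PySem.List.pyRange (-(n / 2)) 0 1
        = -(n / 2) :: PySem.List.pyRange (-(n / 2) + 1) 0 1 :=
      PySem.List.pyRange_one_cons (by omega)
    rw [h1, h2, hfd, hcons]
    simp
  | case2 n head tail h hmod ih =>
    rw [idxLoop, if_pos h, if_neg hmod, ih]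
    have hm : n % 2 = 1 := by
      have : ¬ PySem.Int.mod n 2 = 0 := by simpa using hmod
      rw [PySem.Int.mod_eq_emod_of_pos (by omega : (0:Int) < 2)] at this
      omega
    have hfd : PySem.Int.floordiv n 2 = n / 2 :=
      PySem.Int.floordiv_eq_ediv_of_pos (by omega : (0:Int) < 2)
    have h1 : -((n - 1) / 2) = -(n / 2) := by omega
    have h2 : (n - 1 + (n - 1) % 2) / 2 = (n + n % 2) / 2 - 1 := by omega
    have h3 : n / 2 = (n + n % 2) / 2 - 1 := by omega
    have hsnoc : PySem.List.pyRange 1 ((n + n % 2) / 2) 1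
        = PySem.List.pyRange 1 ((n + n % 2) / 2 - 1) 1 ++ [(n + n % 2) / 2 - 1] := by
      have := PySem.List.pyRange_one_succ_right (a := 1) (b := (n + n % 2) / 2 - 1) (by omega)
      simpa using this
    rw [h1, h2, hfd, h3, hsnoc]
    simp
  | case3 n head tail h =>
    rw [idxLoop, if_neg h]
    have hB1 : PySem.List.pyRange (-(n / 2)) 0 1 = [] := by
      apply PySem.List.pyRange_one_eq_nil; omega
    have hB2 : PySem.List.pyRange 1 ((n + n % 2) / 2) 1 = [] := by
      apply PySem.List.pyRange_one_eq_nil; omega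
    rw [hB1, hB2]
    simp

theorem b_canon (n : Int) : index_str_list_alt n = canonical n := by
  unfold index_str_list_alt canonical
  rw [idxLoop_eq]
  simp

-- ===== VERDICT =====
theorem index_str_list_spec : Claim_equal_index_str_list := by
  intro n _
  unfold Spec_index_str_list
  rw [a_canon, b_canon]
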